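-- pv_equiv track=rewrite | github.com/denizxaytac/advent-of-code | 2017/day06/part2.py | calculate
-- ===== SOURCE A (Python) =====
-- from copy import deepcopy
--
-- def get_index_of_max(numbers):
--     max_num = float("-inf")
--     max_idx = -1
--     for idx, num in enumerate(numbers):
--         if num > max_num:
--             max_num = num
--             max_idx = idx
--     return max_idx
--
-- def distribute(numbers_, max_idx):
--     numbers = deepcopy(numbers_)
--     curr_idx = max_idx
--     curr_idx = curr_idx % len(numbers)
--     for _ in range(numbers[max_idx] + 1):
--         numbers[max_idx] -= 1
--         numbers[curr_idx] += 1
--         curr_idx = (curr_idx + 1) % len(numbers)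
--     return numbers
--
-- def calculate(numbers_):
--     numbers = deepcopy(numbers_)
--     total_distribution = 0
--     seen = list()
--     while True:
--         index_max = get_index_of_max(numbers)
--         numbers = distribute(numbers, index_max)
--         total_distribution += 1
--         if numbers in seen:
--             return (numbers, total_distribution - 1)
--         seen.append(numbers)
-- ===== SOURCE B (Python) =====
-- def calculate(numbers_):
--     # Cycle detection with an O(1) set of state tuples; each redistribution is
--     # done in one O(n) pass via divmod instead of one unit at a time.
--     n = len(numbers_)
--     state = tuple(numbers_)
--     seen = set()
--     steps = 0
--     while True:
--         m = max(state)
--         i = state.index(m)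
--         units = m + 1
--         if units > 0:
--             q, r = divmod(units, n)
--             state = tuple(x - (units if p == i else 0) + q
--                           + (1 if (p - i) % n < r else 0)
--                           for p, x in enumerate(state))
--         steps += 1
--         if state in seen:
--             return (list(state), steps - 1)
--         seen.add(state)
-- ===== Notes on version B (the rewrite author's own statement) =====
-- stated objective: faster
-- what changed: B replaces A's list-scan repeat detection (membership in a growing list of lists) with an O(1) hash set of state tuples, and replaces A's one-unit-at-a-time redistribution loop with a single O(n) pass computed by divmod modular arithmetic.
import Mathlib
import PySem

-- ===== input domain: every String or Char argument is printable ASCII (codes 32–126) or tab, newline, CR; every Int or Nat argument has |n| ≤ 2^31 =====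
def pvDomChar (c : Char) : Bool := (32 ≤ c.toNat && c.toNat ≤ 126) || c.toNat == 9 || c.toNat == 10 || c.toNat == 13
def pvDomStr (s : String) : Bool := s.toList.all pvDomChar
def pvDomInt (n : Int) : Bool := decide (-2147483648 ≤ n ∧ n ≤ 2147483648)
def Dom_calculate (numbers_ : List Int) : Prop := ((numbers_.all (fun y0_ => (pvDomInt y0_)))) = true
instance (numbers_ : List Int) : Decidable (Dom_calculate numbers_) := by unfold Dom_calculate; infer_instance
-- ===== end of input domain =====

-- B replaces A's list-scan repeat detection with a set of states and A's one-unit-at-a-time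
-- redistribution loop with a single divmod-based pass (objective: faster).


-- ===== PORT A =====
-- get_index_of_max: running strict-max over enumerate; float("-inf") is modelled by Option Int
def getIndexOfMax (numbers : List Int) : Int :=
  ((PySem.List.enumerate numbers).foldl
    (fun (st : Option Int × Int) p =>
      match st.1 with
      | none => (some p.2, p.1)
      | some m => if p.2 > m then (some p.2, p.1) else st) (none, -1)).2

-- the body of distribute's 'for _ in range(numbers[max_idx] + 1)' loop, iterated k times
def distLoop (n : Int) (max_idx : Int) : Nat → (List Int × Int) → (List Int × Int)
  | 0, st => st
  | k+1, st =>
      let nums := PySem.List.pySetD st.1 max_idx (PySem.List.pyGetD st.1 max_idx 0 - 1)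
      let nums := PySem.List.pySetD nums st.2 (PySem.List.pyGetD nums st.2 0 + 1)
      distLoop n max_idx k (nums, PySem.Int.mod (st.2 + 1) n)

-- distribute(numbers_, max_idx); n = 0 (ZeroDivisionError in Python) is excluded by Pre_
def distribute (numbers_ : List Int) (max_idx : Int) : List Int :=
  let n : Int := numbers_.length
  let curr0 := PySem.Int.mod max_idx n
  let v := PySem.List.pyGetD numbers_ max_idx 0
  (distLoop n max_idx (v + 1).toNat (numbers_, curr0)).1

-- the 'while True' loop of calculate; the fuel argument is only a totality guard
def calcLoopA : Nat → List Int → List (List Int) → Int → List Int × Int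
  | 0, _, _, _ => ([], -1)
  | fuel+1, numbers, seen, total =>
    let index_max := getIndexOfMax numbers
    let numbers' := distribute numbers index_max
    let total' := total + 1
    if numbers' ∈ seen then (numbers', total' - 1)
    else calcLoopA fuel numbers' (seen ++ [numbers']) total'

def calculate (numbers_ : List Int) : List Int × Int :=
  calcLoopA 4294967296 numbers_ [] 0

-- ===== PORT B =====
-- one redistribution step of Source B: max, first index, then one divmod-based pass
def stepB (state : List Int) : List Int :=
  let n : Int := state.length
  let m := (PySem.List.max? state (fun y => y)).getD 0
  let i : Int := ((PySem.List.index? state m).getD 0 : Nat)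
  let units := m + 1
  if 0 < units then
    let q := PySem.Int.floordiv units n
    let r := PySem.Int.mod units n
    (PySem.List.enumerate state).map (fun p =>
      p.2 - (if p.1 = i then units else 0) + q +
        (if PySem.Int.mod (p.1 - i) n < r then 1 else 0))
  else state

-- the 'while True' loop of Source B; seen is a Python set of states; same fuel guard as A's port
def calcLoopB : Nat → List Int → PySem.Set (List Int) → Int → List Int × Int
  | 0, _, _, _ => ([], -1)
  | fuel+1, state, seen, steps =>
    let state' := stepB state
    let steps' := steps + 1
    if state' ∈ seen then (state', steps' - 1)
    else calcLoopB fuel state' (PySem.Set.add seen state') steps'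

def calculate_alt (numbers_ : List Int) : List Int × Int :=
  calcLoopB 4294967296 numbers_ PySem.Set.empty 0

-- ===== PRECONDITION & SPEC =====
-- Pre_ excludes only the empty list, on which Python A raises ZeroDivisionError (max_idx % len(numbers)).
def Pre_calculate (numbers_ : List Int) : Prop := numbers_ ≠ []
instance (numbers_ : List Int) : Decidable (Pre_calculate numbers_) := by unfold Pre_calculate; infer_instance
def pvWitness_calculate : List Int := [3, 1, 2]

def Spec_calculate (numbers_ : List Int) (out : List Int × Int) : Prop := out = calculate_alt numbers_
instance (numbers_ : List Int) (out : List Int × Int) : Decidable (Spec_calculate numbers_ out) := by unfold Spec_calculate; infer_instance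

-- ===== CLAIM (what is proved, stated in full; the proofs are below) =====
def Claim_equal_calculate : Prop := ∀ (numbers_ : List Int), Dom_calculate numbers_ → Pre_calculate numbers_ → Spec_calculate numbers_ (calculate numbers_)

-- ===== LEMMAS AND PROOFS =====

theorem foldA_spec (t : List Int) : ∀ (m j k : Int),
    (PySem.List.enumerate t k).foldl
      (fun (st : Option Int × Int) p =>
        match st.1 with
        | none => (some p.2, p.1)
        | some m => if p.2 > m then (some p.2, p.1) else st) (some m, j)
    = (some (t.foldl max m),
       if m < t.foldl max m then k + (((PySem.List.index? t (t.foldl max m)).getD 0 : Nat) : Int) else j) := by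
  induction t with
  | nil => intro m j k; simp
  | cons y t ih =>
    intro m j k
    rw [PySem.List.enumerate_cons]
    simp only [List.foldl_cons]
    by_cases hy : y > m
    · simp only [hy, if_pos]
      rw [ih y k (k+1)]
      have hle : y ≤ t.foldl max y := (PySem.List.le_foldl_max t y).1
      rw [max_eq_right (le_of_lt hy)]
      have hml : m < t.foldl max y := lt_of_lt_of_le hy hle
      rw [if_pos hml]
      by_cases hyM : y = t.foldl max y
      · rw [if_neg (by omega)]
        rw [← hyM, PySem.List.index?_cons_self]
        simp
      · have hylt : y < t.foldl max y := lt_of_le_of_ne hle hyM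
        rw [if_pos hylt]
        have hmem : t.foldl max y ∈ t := by
          rcases PySem.List.foldl_max_mem t y with h | h
          · exact absurd h.symm hyM
          · exact h
        obtain ⟨p, hp⟩ := Option.isSome_iff_exists.mp ((PySem.List.index?_isSome_iff t _).mpr hmem)
        rw [PySem.List.index?_cons_of_ne t hyM, hp]
        simp; omega
    · simp only [hy, if_false]
      rw [ih m j (k+1)]
      have hym : y ≤ m := not_lt.mp hy
      rw [max_eq_left hym]
      by_cases hml : m < t.foldl max m
      · rw [if_pos hml, if_pos hml]
        have hmem : t.foldl max m ∈ t := by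
          rcases PySem.List.foldl_max_mem t m with h | h
          · omega
          · exact h
        obtain ⟨p, hp⟩ := Option.isSome_iff_exists.mp ((PySem.List.index?_isSome_iff t _).mpr hmem)
        rw [PySem.List.index?_cons_of_ne t (by omega), hp]
        simp; omega
      · rw [if_neg hml, if_neg hml]

theorem getIndexOfMax_eq (x : Int) (t : List Int) :
    ((PySem.List.enumerate (x :: t) 0).foldl
      (fun (st : Option Int × Int) p =>
        match st.1 with
        | none => (some p.2, p.1)
        | some m => if p.2 > m then (some p.2, p.1) else st) (none, -1)).2
    = (((PySem.List.index? (x :: t) ((PySem.List.max? (x :: t) (fun y => y)).getD 0)).getD 0 : Nat) : Int) := by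
  rw [PySem.List.enumerate_cons]
  simp only [List.foldl_cons]
  rw [foldA_spec t x 0 (0+1)]
  rw [PySem.List.max?_id_cons]
  simp only [Option.getD_some]
  have hle : x ≤ t.foldl max x := (PySem.List.le_foldl_max t x).1
  by_cases hx : x = t.foldl max x
  · rw [if_neg (by omega), ← hx, PySem.List.index?_cons_self]
    simp
  · have hxl : x < t.foldl max x := lt_of_le_of_ne hle hx
    rw [if_pos hxl]
    have hmem : t.foldl max x ∈ t := by
      rcases PySem.List.foldl_max_mem t x with h | h
      · exact absurd h.symm hx
      · exact h
    obtain ⟨p, hp⟩ := Option.isSome_iff_exists.mp ((PySem.List.index?_isSome_iff t _).mpr hmem)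
    rw [PySem.List.index?_cons_of_ne t hx, hp]
    simp; omega

theorem getD_set_helper (xs : List Int) (a p : Nat) (v : Int) (ha : a < xs.length) :
    (xs.set a v).getD p 0 = if p = a then v else xs.getD p 0 := by
  by_cases h : p = a
  · subst h
    simp [List.getD_eq_getElem?_getD, ha]
  · simp only [List.getD_eq_getElem?_getD, List.getElem?_set, if_neg (Ne.symm h), if_neg h]

theorem distLoop_length (n i : Int) : ∀ (k : Nat) (st : List Int × Int),
    (distLoop n i k st).1.length = st.1.length := by
  intro k
  induction k with
  | zero => intro st; rfl
  | succ k ih => intro st; rw [distLoop]; rw [ih]; simp [PySem.List.length_pySetD]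

theorem cnt_shift (N c p k : Nat) (hc : c < N) :
    (List.range (k+1)).countP (fun j => decide ((c + j) % N = p))
    = (if c = p then 1 else 0) + (List.range k).countP (fun j => decide (((c+1) % N + j) % N = p)) := by
  rw [List.range_succ_eq_map, List.countP_cons, List.countP_map]
  have hfe : ((fun j => decide ((c + j) % N = p)) ∘ Nat.succ)
      = (fun j => decide (((c+1) % N + j) % N = p)) := by
    funext j
    simp only [Function.comp, Nat.succ_eq_add_one]
    have e : c + (j + 1) = c + 1 + j := by omega
    rw [e, Nat.mod_add_mod]
  rw [hfe]
  have h0 : (decide ((c + 0) % N = p) : Bool) = decide (c = p) := by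
    simp [Nat.mod_eq_of_lt hc]
  rw [h0]
  simp only [decide_eq_true_eq]
  split_ifs <;> omega

theorem distLoop_getD (N : Nat) (i : Nat) (hi : i < N) :
    ∀ (k : Nat) (nums : List Int) (c : Nat), nums.length = N → c < N →
    ∀ (p : Nat), p < N →
    ((distLoop (N : Int) (i : Int) k (nums, (c : Int))).1).getD p 0
      = nums.getD p 0 - (if p = i then (k : Int) else 0)
        + (((List.range k).countP (fun j => decide ((c + j) % N = p))) : Int) := by
  intro k
  induction k with
  | zero =>
    intro nums c hlen hc p hp
    simp [distLoop]
  | succ k ih =>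
    intro nums c hlen hc p hp
    rw [distLoop]
    simp only [PySem.List.pyGetD_natCast, PySem.List.pySetD_natCast]
    have hN : 0 < N := by omega
    have hcast : ((c : Int) + 1) = (((c + 1 : Nat)) : Int) := by push_cast; ring
    rw [hcast, PySem.Int.mod_natCast]
    set nums1 := nums.set i (nums.getD i 0 - 1) with hn1
    set nums2 := nums1.set c (nums1.getD c 0 + 1) with hn2
    have hlen1 : nums1.length = N := by rw [hn1]; simp [hlen]
    have hlen2 : nums2.length = N := by rw [hn2]; simp [hlen1]
    rw [ih nums2 ((c+1) % N) hlen2 (Nat.mod_lt _ hN) p hp]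
    have hg2 : nums2.getD p 0 = (if p = c then nums1.getD c 0 + 1 else nums1.getD p 0) := by
      rw [hn2]; exact getD_set_helper nums1 c p _ (by omega)
    have hg1 : ∀ q, q < N → nums1.getD q 0 = (if q = i then nums.getD i 0 - 1 else nums.getD q 0) := by
      intro q _; rw [hn1]; exact getD_set_helper nums i q _ (by omega)
    rw [cnt_shift N c p k hc]
    rw [hg2]
    rw [hg1 p hp]
    rw [hg1 c hc]
    by_cases hpc : p = c <;> by_cases hpi : p = i <;>
      subst_vars <;> split_ifs <;> subst_vars <;> push_cast <;> omega

theorem cnt_closed (N : Nat) (hN : 0 < N) (d : Nat) (_hd : d < N) :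
    ∀ k, (List.range k).countP (fun j => decide (j % N = d)) = k / N + (if d < k % N then 1 else 0) := by
  intro k
  induction k with
  | zero => simp
  | succ k ih =>
    rw [List.range_succ, List.countP_append, ih]
    have hmodrec : (k + 1) % N = (k % N + 1) % N := by
      conv_lhs => rw [← Nat.mod_add_mod]
    by_cases h : k % N = N - 1
    · have hdvd : N ∣ (k + 1) := by
        have : (k + 1) % N = 0 := by rw [hmodrec, h]; simp [Nat.sub_add_cancel hN]
        omega
      have hdiv : (k + 1) / N = k / N + 1 := by
        rw [Nat.succ_div, if_pos hdvd]
      have hmod : (k + 1) % N = 0 := by omega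
      rw [hdiv, hmod]
      simp only [List.countP_singleton, decide_eq_true_eq]
      split_ifs <;> omega
    · have hklt : k % N < N - 1 := by have := Nat.mod_lt k hN; omega
      have hmod : (k + 1) % N = k % N + 1 := by
        rw [hmodrec, Nat.mod_eq_of_lt (by omega)]
      have hdiv : (k + 1) / N = k / N := by
        rw [Nat.succ_div, if_neg (by omega)]
        omega
      rw [hdiv, hmod]
      simp only [List.countP_singleton, decide_eq_true_eq]
      split_ifs <;> omega

theorem cnt_conv (N c p : Nat) (hc : c < N) (hp : p < N) (k : Nat) :
    (List.range k).countP (fun j => decide ((c + j) % N = p))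
    = (List.range k).countP (fun j => decide (j % N = (p + N - c) % N)) := by
  apply List.countP_congr
  intro j _
  simp only [decide_eq_true_eq]
  constructor
  · intro h
    have : (c + j) % N = (c + (p + N - c)) % N := by
      rw [h]
      have e : c + (p + N - c) = p + N := by omega
      rw [e, Nat.add_mod_right, Nat.mod_eq_of_lt hp]
    have h2 : j % N = (p + N - c) % N := by
      have := Nat.ModEq.add_left_cancel' c (Nat.ModEq.symm this)
      exact this.symm
    exact h2
  · intro h
    have hje : (c + j) % N = (c + (p + N - c)) % N := by
      have : j ≡ (p + N - c) [MOD N] := h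
      exact Nat.ModEq.add_left c this
    rw [hje]
    have e : c + (p + N - c) = p + N := by omega
    rw [e, Nat.add_mod_right, Nat.mod_eq_of_lt hp]

theorem int_mod_sub (N p i : Nat) (hN : 0 < N) (_hp : p < N) (hi : i < N) :
    PySem.Int.mod ((p : Int) - (i : Int)) (N : Int)
      = (((p + N - i) % N : Nat) : Int) := by
  rw [PySem.Int.mod_eq_emod_of_pos (by exact_mod_cast hN)]
  have e : ((p + N - i : Nat) : Int) = (p : Int) + (N : Int) - (i : Int) := by
    have h : i ≤ p + N := by omega
    push_cast [Nat.cast_sub h]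
    ring
  have hr : (((p + N - i) % N : Nat) : Int) = ((p + N - i : Nat) : Int) % (N : Int) := by
    push_cast
    ring
  rw [hr, e]
  have e2 : (p : Int) + (N : Int) - (i : Int) = ((p : Int) - (i : Int)) + (N : Int) := by ring
  rw [e2, Int.add_emod_right]

theorem step_eq (s : List Int) (hs : s ≠ []) :
    distribute s (getIndexOfMax s) = stepB s := by
  obtain ⟨x, t, rfl⟩ := List.exists_cons_of_ne_nil hs
  have hmax : PySem.List.max? (x :: t) (fun y => y) = some (t.foldl max x) :=
    PySem.List.max?_id_cons x t
  set M := t.foldl max x with hM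
  have hMmem : M ∈ x :: t := PySem.List.max?_mem hmax
  obtain ⟨i, hi⟩ := Option.isSome_iff_exists.mp
    ((PySem.List.index?_isSome_iff (x :: t) M).mpr hMmem)
  obtain ⟨hiN, hsi, -⟩ := PySem.List.getElem_of_index?_eq_some hi
  set N := (x :: t).length with hNdef
  have hN : 0 < N := by simp [hNdef]
  have hgix : getIndexOfMax (x :: t) = (i : Int) := by
    unfold getIndexOfMax
    rw [getIndexOfMax_eq, hmax]
    simp only [Option.getD_some]
    rw [hi]
    simp
  rw [hgix]
  unfold distribute stepB
  rw [hmax]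
  simp only [Option.getD_some, ← hNdef]
  rw [hi]
  simp only [Option.getD_some]
  have hcurr : PySem.Int.mod (i : Int) (N : Int) = (i : Int) := by
    rw [PySem.Int.mod_natCast, Nat.mod_eq_of_lt hiN]
  have hv : PySem.List.pyGetD (x :: t) (i : Int) 0 = M := by
    rw [PySem.List.pyGetD_natCast, List.getD_eq_getElem _ _ hiN, hsi]
  rw [hcurr, hv]
  by_cases hpos : 0 < M + 1
  · rw [if_pos hpos]
    set k := (M + 1).toNat with hk
    have hkcast : (k : Int) = M + 1 := Int.toNat_of_nonneg (by omega)
    have hlenL : (distLoop (N : Int) (i : Int) k ((x :: t), (i : Int))).1.length = N :=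
      distLoop_length _ _ _ _
    refine List.ext_getElem ?_ ?_
    · rw [hlenL, List.length_map, PySem.List.length_enumerate]
    intro p hp1 hp2
    have hpN : p < N := by rw [← hlenL]; exact hp1
    -- left side via the loop invariant
    have hL : (distLoop (N : Int) (i : Int) k ((x :: t), (i : Int))).1[p]'hp1
        = (x :: t).getD p 0 - (if p = i then (k : Int) else 0)
          + (((List.range k).countP (fun j => decide ((i + j) % N = p))) : Int) := by
      rw [← List.getD_eq_getElem _ 0 hp1]
      exact distLoop_getD N i hiN k (x :: t) i rfl hiN p hpN
    rw [hL]
    -- right side: element p of the mapped enumerate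
    rw [List.getElem_map]
    rw [PySem.List.getElem_enumerate _ _ p (by rw [PySem.List.length_enumerate]; exact hpN)]
    simp only [zero_add]
    -- closed form of the count
    set d := (p + N - i) % N with hd
    have hdN : d < N := Nat.mod_lt _ hN
    have hcnt : (List.range k).countP (fun j => decide ((i + j) % N = p))
        = k / N + (if d < k % N then 1 else 0) := by
      rw [cnt_conv N i p hiN hpN k, ← hd, cnt_closed N hN d hdN k]
    rw [hcnt]
    -- rewrite B's divmod pieces through Nat casts
    have hq : PySem.Int.floordiv (M + 1) (N : Int) = ((k / N : Nat) : Int) := by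
      rw [← hkcast, PySem.Int.floordiv_natCast]
    have hr : PySem.Int.mod (M + 1) (N : Int) = ((k % N : Nat) : Int) := by
      rw [← hkcast, PySem.Int.mod_natCast]
    rw [hq, hr, int_mod_sub N p i hN hpN hiN, ← hd]
    have hgetDp : (x :: t).getD p 0 = (x :: t)[p]'hpN := List.getD_eq_getElem _ 0 hpN
    rw [hgetDp, ← hkcast]
    simp only [Nat.cast_inj, Nat.cast_lt]
    split_ifs <;> push_cast <;> ring
  · rw [if_neg hpos]
    have hk0 : (M + 1).toNat = 0 := by omega
    rw [hk0]
    rfl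

theorem distribute_length (s : List Int) (m : Int) : (distribute s m).length = s.length := by
  unfold distribute
  exact distLoop_length _ _ _ _

theorem loop_eq : ∀ (fuel : Nat) (s : List Int) (seen : List (List Int)) (total : Int),
    s ≠ [] → calcLoopA fuel s seen total = calcLoopB fuel s seen total := by
  intro fuel
  induction fuel with
  | zero => intro s seen total _; rfl
  | succ fuel ih =>
    intro s seen total hs
    rw [calcLoopA, calcLoopB]
    simp only [← step_eq s hs]
    by_cases hmem : distribute s (getIndexOfMax s) ∈ seen
    · rw [if_pos hmem, if_pos hmem]
    · rw [if_neg hmem, if_neg hmem]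
      rw [PySem.Set.add_of_not_mem hmem]
      apply ih
      have : (distribute s (getIndexOfMax s)).length = s.length := distribute_length _ _
      intro hnil
      rw [hnil] at this
      simp at this
      exact hs (List.eq_nil_of_length_eq_zero this.symm)

-- ===== VERDICT (by name: the statement is the Claim_ definition above) =====
theorem calculate_spec : Claim_equal_calculate := by
  intro numbers_ _ hpre
  unfold Spec_calculate calculate calculate_alt
  exact loop_eq 4294967296 numbers_ [] 0 hpre
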